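-- pv_equiv track=rewrite | github.com/faiqhilman13/b2b-agents | lead_generator/config/proposal_config.py | determine_organization_type
-- ===== SOURCE A (Python) =====
-- from typing import Dict, List, Optional, Any
--
-- ORGANIZATION_TYPES = {
--     "corporate": [
--         "sdn bhd", "berhad", "limited", "llc", "inc", "corporation", "corp",
--         "pte ltd", "private limited", "enterprise", "company", "consulting",
--         "agency", "firm", "partners", "associates", "group"
--     ],
--     "government": [
--         "ministry", "department", "jabatan", "kementerian", "gov", "govt",
--         "pejabat", "suruhanjaya", "council", "authority", "board", "commission",
--         "public sector", "majlis", "agensi", "negeri", "federal", "pusat"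
--     ],
--     "university": [
--         "university", "universiti", "college", "kolej", "institute", "institut",
--         "campus", "faculty", "school of", "academic", "education", "higher education",
--         "graduate school", "polytechnic", "research center"
--     ],
--     "school": [
--         "school", "sekolah", "academy", "akademi", "primary school", "secondary school",
--         "high school", "middle school", "elementary", "kindergarten", "tadika",
--         "preschool", "education center"
--     ]
-- }
--
-- def determine_organization_type(lead_data: Dict[str, Any]) -> str:
--     """
--     Determine the type of organization from lead data.
--
--     Args:
--         lead_data: Dictionary containing lead information
--
--     Returns:
--         Organization type (corporate, government, university, school)
--     """
--     organization = lead_data.get("organization", "").lower()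
--
--     # Check source URL for indicators
--     source_url = lead_data.get("source_url", "").lower()
--
--     # Check each type in priority order
--     for org_type, keywords in ORGANIZATION_TYPES.items():
--         for keyword in keywords:
--             if keyword.lower() in organization or keyword.lower() in source_url:
--                 return org_type
--
--     # Default to corporate if no clear match
--     return "corporate"
-- ===== SOURCE B (Python) =====
-- ORGANIZATION_TYPES = {
--     "corporate": [
--         "sdn bhd", "berhad", "limited", "llc", "inc", "corporation", "corp",
--         "pte ltd", "private limited", "enterprise", "company", "consulting",
--         "agency", "firm", "partners", "associates", "group"
--     ],
--     "government": [
--         "ministry", "department", "jabatan", "kementerian", "gov", "govt",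
--         "pejabat", "suruhanjaya", "council", "authority", "board", "commission",
--         "public sector", "majlis", "agensi", "negeri", "federal", "pusat"
--     ],
--     "university": [
--         "university", "universiti", "college", "kolej", "institute", "institut",
--         "campus", "faculty", "school of", "academic", "education", "higher education",
--         "graduate school", "polytechnic", "research center"
--     ],
--     "school": [
--         "school", "sekolah", "academy", "akademi", "primary school", "secondary school",
--         "high school", "middle school", "elementary", "kindergarten", "tadika",
--         "preschool", "education center"
--     ]
-- }
--
-- # One-time flat index: lowercased keyword -> priority rank of its type
-- # (first occurrence wins, i.e. the smallest rank), plus the distinct keyword lengths.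
-- _TYPE_NAMES = list(ORGANIZATION_TYPES)
-- _KEYWORD_RANK = {}
-- for _rank, _kws in enumerate(ORGANIZATION_TYPES.values()):
--     for _k in _kws:
--         _kl = _k.lower()
--         if _kl not in _KEYWORD_RANK:
--             _KEYWORD_RANK[_kl] = _rank
-- _KEYWORD_LENGTHS = sorted({len(k) for k in _KEYWORD_RANK})
--
--
-- def _pick(best):
--     return _TYPE_NAMES[best] if best < len(_TYPE_NAMES) else "corporate"
--
--
-- def determine_organization_type(lead_data):
--     # Scan the TEXT, not the keyword lists: every window text[i:i+L] (for each
--     # keyword length L) is looked up in the flat keyword->rank dictionary and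
--     # the minimum rank found anywhere wins; no per-keyword substring tests.
--     best = len(_TYPE_NAMES)
--     for field in ("organization", "source_url"):
--         text = lead_data.get(field, "").lower()
--         for i in range(len(text)):
--             for L in _KEYWORD_LENGTHS:
--                 r = _KEYWORD_RANK.get(text[i:i + L])
--                 if r is not None and r < best:
--                     best = r
--     return _pick(best)
-- ===== Notes on version B (the rewrite author's own statement) =====
-- stated objective: alternative
-- what changed: Replaced A's nested scan over keyword lists with substring tests by a multi-pattern text scan: a flat keyword->priority-rank dictionary and the set of keyword lengths are built once, then every window text[i:i+L] of the two lowercased fields is looked up in the dictionary and the minimum rank found selects the type (default 'corporate').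
import Mathlib
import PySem

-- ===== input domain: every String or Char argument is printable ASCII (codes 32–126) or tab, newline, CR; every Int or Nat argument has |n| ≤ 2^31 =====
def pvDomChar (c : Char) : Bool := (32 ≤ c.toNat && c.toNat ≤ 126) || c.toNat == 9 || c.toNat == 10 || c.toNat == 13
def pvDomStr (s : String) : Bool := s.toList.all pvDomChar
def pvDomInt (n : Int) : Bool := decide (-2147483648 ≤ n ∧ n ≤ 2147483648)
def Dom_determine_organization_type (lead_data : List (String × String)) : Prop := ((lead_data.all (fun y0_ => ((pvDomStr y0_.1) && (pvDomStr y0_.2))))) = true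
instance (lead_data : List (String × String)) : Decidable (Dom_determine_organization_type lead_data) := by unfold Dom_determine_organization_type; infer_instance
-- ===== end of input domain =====

-- B replaces A's per-keyword substring tests by a text-window scan: every slice
-- text[i:i+L] is looked up in a flat keyword->priority-rank dictionary built once,
-- and the minimum rank found wins (objective: alternative algorithm, similar cost).

-- ===== PORT A =====
def pvOrgTypes : List (String × List String) := [
  ("corporate", ["sdn bhd", "berhad", "limited", "llc", "inc", "corporation", "corp", "pte ltd", "private limited", "enterprise", "company", "consulting", "agency", "firm", "partners", "associates", "group"]),
  ("government", ["ministry", "department", "jabatan", "kementerian", "gov", "govt", "pejabat", "suruhanjaya", "council", "authority", "board", "commission", "public sector", "majlis", "agensi", "negeri", "federal", "pusat"]),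
  ("university", ["university", "universiti", "college", "kolej", "institute", "institut", "campus", "faculty", "school of", "academic", "education", "higher education", "graduate school", "polytechnic", "research center"]),
  ("school", ["school", "sekolah", "academy", "akademi", "primary school", "secondary school", "high school", "middle school", "elementary", "kindergarten", "tadika", "preschool", "education center"])]

-- the test 'keyword.lower() in organization or keyword.lower() in source_url'
def pvHit (org url k : String) : Bool :=
  PySem.Str.isIn (PySem.Str.lower k) org || PySem.Str.isIn (PySem.Str.lower k) url

-- inner 'for keyword in keywords: if ...: return org_type'
def pvAInner (org_type : String) (keywords : List String) (org url : String) : Option String :=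
  match keywords with
  | [] => none
  | k :: rest => if pvHit org url k then some org_type else pvAInner org_type rest org url

-- outer 'for org_type, keywords in ORGANIZATION_TYPES.items(): ...'
def pvALoop (l : List (String × List String)) (org url : String) : String :=
  match l with
  | [] => "corporate"
  | (t, kws) :: rest =>
    match pvAInner t kws org url with
    | some r => r
    | none => pvALoop rest org url

def determine_organization_type (lead_data : List (String × String)) : String :=
  let organization := PySem.Str.lower ((PySem.Dict.mk lead_data).getD "organization" "")
  let source_url := PySem.Str.lower ((PySem.Dict.mk lead_data).getD "source_url" "")
  pvALoop pvOrgTypes organization source_url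

-- ===== PORT B =====
-- _TYPE_NAMES = list(ORGANIZATION_TYPES)
def pvTypeNames : List String := pvOrgTypes.map Prod.fst

-- the module-level build loop of _KEYWORD_RANK (first occurrence keeps the smaller rank)
def pvRankDict : PySem.Dict String Int :=
  (PySem.List.enumerate (pvOrgTypes.map Prod.snd) 0).foldl
    (fun d p => p.2.foldl (fun d k =>
      let kl := PySem.Str.lower k
      if d.contains kl then d else d.insert kl p.1) d)
    PySem.Dict.empty

-- _KEYWORD_LENGTHS = sorted({len(k) for k in _KEYWORD_RANK})
def pvLengths : List Int :=
  PySem.List.sorted (PySem.Set.ofList (pvRankDict.keys.map (fun k => (PySem.Str.len k : Int)))) (fun x => x) false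

-- 'for i in range(len(text)): for L in _KEYWORD_LENGTHS: r = _KEYWORD_RANK.get(text[i:i+L]); if r is not None and r < best: best = r'
def pvScanText (best : Int) (text : String) : Int :=
  (PySem.List.pyRange 0 (PySem.Str.len text) 1).foldl (fun best i =>
    pvLengths.foldl (fun best L =>
      match pvRankDict.get? (PySem.Str.slice text (some i) (some (i + L))) with
      | some r => if r < best then r else best
      | none => best) best) best

-- '_TYPE_NAMES[best] if best < len(_TYPE_NAMES) else "corporate"'
def pvPick (best : Int) : String :=
  if best < (pvTypeNames.length : Int) then PySem.List.pyGetD pvTypeNames best "corporate" else "corporate"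

def determine_organization_type_alt (lead_data : List (String × String)) : String :=
  let d := PySem.Dict.mk lead_data
  let best := ["organization", "source_url"].foldl
      (fun best field => pvScanText best (PySem.Str.lower (d.getD field ""))) (pvTypeNames.length : Int)
  pvPick best

-- ===== PRECONDITION & SPEC =====
def Spec_determine_organization_type (lead_data : List (String × String)) (out : String) : Prop := out = determine_organization_type_alt lead_data
instance (lead_data : List (String × String)) (out : String) : Decidable (Spec_determine_organization_type lead_data out) := by unfold Spec_determine_organization_type; infer_instance

-- ===== CLAIM (what is proved, stated in full; the proofs are below) =====
def Claim_equal_determine_organization_type : Prop := ∀ (lead_data : List (String × String)), Dom_determine_organization_type lead_data → Spec_determine_organization_type lead_data (determine_organization_type lead_data)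

-- ===== LEMMAS AND PROOFS =====

-- proof-side shorthands
def pvKws : List (List String) := pvOrgTypes.map Prod.snd
def pvHitJ (t1 t2 : String) (j : Nat) : Bool := (pvKws.getD j []).any (pvHit t1 t2)
-- the flat keyword/rank pairs pvRankDict's build loop produces, as a literal
def pvPairs : List (String × Int) := [
  ("sdn bhd", 0),
  ("berhad", 0),
  ("limited", 0),
  ("llc", 0),
  ("inc", 0),
  ("corporation", 0),
  ("corp", 0),
  ("pte ltd", 0),
  ("private limited", 0),
  ("enterprise", 0),
  ("company", 0),
  ("consulting", 0),
  ("agency", 0),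
  ("firm", 0),
  ("partners", 0),
  ("associates", 0),
  ("group", 0),
  ("ministry", 1),
  ("department", 1),
  ("jabatan", 1),
  ("kementerian", 1),
  ("gov", 1),
  ("govt", 1),
  ("pejabat", 1),
  ("suruhanjaya", 1),
  ("council", 1),
  ("authority", 1),
  ("board", 1),
  ("commission", 1),
  ("public sector", 1),
  ("majlis", 1),
  ("agensi", 1),
  ("negeri", 1),
  ("federal", 1),
  ("pusat", 1),
  ("university", 2),
  ("universiti", 2),
  ("college", 2),
  ("kolej", 2),
  ("institute", 2),
  ("institut", 2),
  ("campus", 2),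
  ("faculty", 2),
  ("school of", 2),
  ("academic", 2),
  ("education", 2),
  ("higher education", 2),
  ("graduate school", 2),
  ("polytechnic", 2),
  ("research center", 2),
  ("school", 3),
  ("sekolah", 3),
  ("academy", 3),
  ("akademi", 3),
  ("primary school", 3),
  ("secondary school", 3),
  ("high school", 3),
  ("middle school", 3),
  ("elementary", 3),
  ("kindergarten", 3),
  ("tadika", 3),
  ("preschool", 3),
  ("education center", 3)]
def pvCands (text : String) : List Int :=
  (PySem.List.pyRange 0 (PySem.Str.len text) 1).flatMap (fun i =>
    pvLengths.filterMap (fun L => pvRankDict.get? (PySem.Str.slice text (some i) (some (i + L)))))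

-- closed facts about the constants
set_option maxRecDepth 40000 in
set_option maxHeartbeats 2000000 in
theorem pv_rank_lit : pvRankDict = PySem.Dict.mk pvPairs := by decide
set_option maxRecDepth 40000 in
set_option maxHeartbeats 2000000 in
theorem pv_lengths_lit : pvLengths = [3, 4, 5, 6, 7, 8, 9, 10, 11, 12, 13, 14, 15, 16] := by decide
theorem pv_names_len : (pvTypeNames.length : Int) = 4 := by decide
set_option maxRecDepth 40000 in
set_option maxHeartbeats 2000000 in
theorem pv_pairs_all : (pvPairs.all (fun p => decide (p.1 ∈ pvKws.getD p.2.toNat []) && (PySem.Str.lower p.1 == p.1) && decide (0 ≤ p.2) && decide (p.2 < 4))) = true := by decide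
set_option maxRecDepth 100000 in
set_option maxHeartbeats 4000000 in
theorem pv_kw_all : ∀ j : Fin 4, ((pvKws.getD j.val []).all (fun k =>
    (pvRankDict.get? k == some (j.val : Int)) && (PySem.Str.lower k == k) &&
    decide ((PySem.Str.len k : Int) ∈ pvLengths) && !decide (k.toList = []))) = true := by decide

-- A's early-return nested loop, characterised per type
theorem pvAInner_eq_any (t : String) (kws : List String) (org url : String) :
    pvAInner t kws org url = if kws.any (pvHit org url) then some t else none := by
  induction kws with
  | nil => simp [pvAInner]
  | cons k rest ih => by_cases h : pvHit org url k <;> simp [pvAInner, h, ih]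

theorem pvALoop_cons (t : String) (kws : List String) (rest : List (String × List String)) (o u : String) :
    pvALoop ((t, kws) :: rest) o u = if kws.any (pvHit o u) then t else pvALoop rest o u := by
  rw [pvALoop, pvAInner_eq_any]
  by_cases h : kws.any (pvHit o u) <;> simp [h]

theorem pv_aloop_char (t1 t2 : String) :
    pvALoop pvOrgTypes t1 t2 =
      (if pvHitJ t1 t2 0 then "corporate" else if pvHitJ t1 t2 1 then "government"
       else if pvHitJ t1 t2 2 then "university" else if pvHitJ t1 t2 3 then "school" else "corporate") := by
  simp only [pvOrgTypes, pvALoop_cons]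
  rfl

-- fold/min bookkeeping
theorem pv_foldl_optmin {α : Type} (g : α → Option Int) (l : List α) (b : Int) :
    l.foldl (fun b x => match g x with | some r => if r < b then r else b | none => b) b
      = (l.filterMap g).foldl min b := by
  induction l generalizing b with
  | nil => rfl
  | cons x xs ih =>
      simp only [List.foldl_cons, List.filterMap_cons]
      cases hg : g x with
      | none => simp [ih]
      | some r =>
          simp only [ih]
          have : (if r < b then r else b) = min b r := by split_ifs <;> omega
          simp [this]

theorem pv_foldl_min_le_init (l : List Int) (b : Int) : l.foldl min b ≤ b := by
  induction l generalizing b with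
  | nil => simp
  | cons x xs ih => exact le_trans (ih _) (min_le_left _ _)

theorem pv_foldl_min_le_mem (l : List Int) : ∀ (b x : Int), x ∈ l → l.foldl min b ≤ x := by
  induction l with
  | nil => intro b x h; cases h
  | cons y ys ih =>
      intro b x h
      rw [List.foldl_cons]
      rcases List.mem_cons.mp h with rfl | h'
      · exact le_trans (pv_foldl_min_le_init ys (min b x)) (min_le_right b x)
      · exact ih (min b y) x h'

theorem pv_foldl_min_eq_or (l : List Int) (b : Int) : l.foldl min b = b ∨ l.foldl min b ∈ l := by
  induction l generalizing b with
  | nil => left; rfl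
  | cons x xs ih =>
      rw [List.foldl_cons]
      rcases ih (min b x) with h | h
      · by_cases hbx : b ≤ x
        · left; rw [h, min_eq_left hbx]
        · right; rw [h, min_eq_right (by omega)]; exact List.mem_cons_self ..
      · right; exact List.mem_cons_of_mem _ h

theorem pv_scan_eq (b : Int) (text : String) :
    pvScanText b text = (pvCands text).foldl min b := by
  unfold pvScanText pvCands
  rw [List.flatMap, List.foldl_flatten, List.foldl_map]
  simp only [pv_foldl_optmin]

theorem pv_cands_sound (t : String) (r : Int) (hr : r ∈ pvCands t) :
    0 ≤ r ∧ r < 4 ∧ ∃ k ∈ pvKws.getD r.toNat [], PySem.Str.isIn (PySem.Str.lower k) t = true := by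
  unfold pvCands at hr
  rw [List.mem_flatMap] at hr
  obtain ⟨i, hi, hr⟩ := hr
  rw [List.mem_filterMap] at hr
  obtain ⟨L, hL, hget⟩ := hr
  rw [pv_rank_lit] at hget
  have hmem : (PySem.Str.slice t (some i) (some (i + L)), r) ∈ pvPairs :=
    PySem.Dict.mem_items_of_get?_eq_some _ hget
  have hall := List.all_eq_true.mp pv_pairs_all _ hmem
  simp only [Bool.and_eq_true, beq_iff_eq, decide_eq_true_eq] at hall
  obtain ⟨⟨⟨hkmem, hlow⟩, hr0⟩, hr4⟩ := hall
  refine ⟨hr0, hr4, PySem.Str.slice t (some i) (some (i + L)), hkmem, ?_⟩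
  rw [hlow, PySem.Str.isIn_iff_infix]
  have h0i : 0 ≤ i := ((PySem.List.mem_pyRange_one).mp hi).1
  have h0L : 0 ≤ L := by rw [pv_lengths_lit] at hL; simp at hL; omega
  have hsl : (PySem.Str.slice t (some i) (some (i + L))).toList
      = (t.toList.drop i.toNat).take ((i + L).toNat - i.toNat) := by
    simp only [PySem.Str.toList_slice, PySem.Chars.slice_eq_listSlice]
    rw [PySem.List.slice_toNat _ h0i (by omega)]
  rw [hsl]
  exact ((List.take_prefix _ _).isInfix).trans (List.drop_suffix _ _).isInfix

theorem pv_cands_complete (t : String) (j : Nat) (hj : j < 4) (k : String)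
    (hk : k ∈ pvKws.getD j []) (hIn : PySem.Str.isIn (PySem.Str.lower k) t = true) :
    (j : Int) ∈ pvCands t := by
  have hkfacts := List.all_eq_true.mp (pv_kw_all ⟨j, hj⟩) k hk
  simp only [Bool.and_eq_true, beq_iff_eq, Bool.not_eq_true', decide_eq_true_eq,
    decide_eq_false_iff_not] at hkfacts
  obtain ⟨⟨⟨hget, hlow⟩, hlenmem⟩, hne⟩ := hkfacts
  rw [hlow, PySem.Str.isIn_iff_infix] at hIn
  have hIn2 : PySem.Chars.isIn k.toList t.toList = true := by
    rw [PySem.Chars.isIn_iff_infix]; exact hIn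
  obtain ⟨i, hpre⟩ := (PySem.Chars.exists_prefix_drop_iff_isIn k.toList t.toList).mpr hIn2
  have htake : (t.toList.drop i).take k.toList.length = k.toList :=
    (List.prefix_iff_eq_take.mp hpre).symm
  have hilt : i < t.toList.length := by
    by_contra hge
    rw [List.drop_eq_nil_of_le (by omega)] at hpre
    exact hne (List.prefix_nil.mp hpre)
  have hlen_t : PySem.Str.len t = t.toList.length := by
    simp [PySem.Str.len]
  have hlen_k : PySem.Str.len k = k.toList.length := by
    simp [PySem.Str.len]
  have hrange : (i : Int) ∈ PySem.List.pyRange 0 (PySem.Str.len t) 1 := by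
    rw [PySem.List.mem_pyRange_one]
    constructor
    · exact_mod_cast Nat.zero_le i
    · rw [hlen_t]; exact_mod_cast hilt
  have hslice : PySem.Str.slice t (some (i : Int)) (some ((i : Int) + (PySem.Str.len k : Int))) = k := by
    apply String.toList_inj.mp
    simp only [PySem.Str.toList_slice, PySem.Chars.slice_eq_listSlice]
    rw [hlen_k, PySem.List.slice_natCast_add, htake]
  unfold pvCands
  rw [List.mem_flatMap]
  refine ⟨(i : Int), hrange, ?_⟩
  rw [List.mem_filterMap]
  exact ⟨(PySem.Str.len k : Int), hlenmem, by rw [hslice, hget]⟩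

theorem pv_best_char (t1 t2 : String) :
    (pvCands t1 ++ pvCands t2).foldl min 4 =
      (if pvHitJ t1 t2 0 then 0 else if pvHitJ t1 t2 1 then 1
       else if pvHitJ t1 t2 2 then 2 else if pvHitJ t1 t2 3 then (3 : Int) else 4) := by
  have hsound : ∀ r ∈ pvCands t1 ++ pvCands t2, 0 ≤ r ∧ r < 4 ∧ pvHitJ t1 t2 r.toNat = true := by
    intro r hr
    rcases List.mem_append.mp hr with h | h
    · obtain ⟨h0, h4, k, hk, hIn⟩ := pv_cands_sound t1 r h
      exact ⟨h0, h4, List.any_eq_true.mpr ⟨k, hk, by unfold pvHit; rw [hIn, Bool.true_or]⟩⟩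
    · obtain ⟨h0, h4, k, hk, hIn⟩ := pv_cands_sound t2 r h
      exact ⟨h0, h4, List.any_eq_true.mpr ⟨k, hk, by unfold pvHit; rw [hIn, Bool.or_true]⟩⟩
  have hcomp : ∀ j : Nat, j < 4 → pvHitJ t1 t2 j = true → (j : Int) ∈ pvCands t1 ++ pvCands t2 := by
    intro j hj hhit
    obtain ⟨k, hk, hh⟩ := List.any_eq_true.mp hhit
    simp only [pvHit, Bool.or_eq_true] at hh
    rcases hh with hh | hh
    · exact List.mem_append.mpr (Or.inl (pv_cands_complete t1 j hj k hk hh))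
    · exact List.mem_append.mpr (Or.inr (pv_cands_complete t2 j hj k hk hh))
  have hor := pv_foldl_min_eq_or (pvCands t1 ++ pvCands t2) 4
  by_cases h0 : pvHitJ t1 t2 0
  · have hle := pv_foldl_min_le_mem (pvCands t1 ++ pvCands t2) 4 0 (hcomp 0 (by omega) h0)
    have hge : 0 ≤ (pvCands t1 ++ pvCands t2).foldl min 4 := by
      rcases hor with h | h
      · omega
      · exact (hsound _ h).1
    simp only [h0, if_true]
    omega
  · by_cases h1 : pvHitJ t1 t2 1
    · have hle := pv_foldl_min_le_mem (pvCands t1 ++ pvCands t2) 4 1 (hcomp 1 (by omega) h1)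
      simp only [h0, h1, if_true]
      rcases hor with h | h
      · omega
      · obtain ⟨hb0, hb4, hbhit⟩ := hsound _ h
        set b := (pvCands t1 ++ pvCands t2).foldl min 4 with hb
        have : b = 0 ∨ b = 1 := by omega
        rcases this with rfl0 | rfl1
        · exfalso; apply h0; simpa [rfl0] using hbhit
        · exact rfl1
    · by_cases h2 : pvHitJ t1 t2 2
      · have hle := pv_foldl_min_le_mem (pvCands t1 ++ pvCands t2) 4 2 (hcomp 2 (by omega) h2)
        simp only [h0, h1, h2, if_true]
        rcases hor with h | h
        · omega
        · obtain ⟨hb0, hb4, hbhit⟩ := hsound _ h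
          set b := (pvCands t1 ++ pvCands t2).foldl min 4 with hb
          have hcase : b = 0 ∨ b = 1 ∨ b = 2 := by omega
          rcases hcase with hbe | hbe | hbe
          · exfalso; apply h0; simpa [hbe] using hbhit
          · exfalso; apply h1; simpa [hbe] using hbhit
          · exact hbe
      · by_cases h3 : pvHitJ t1 t2 3
        · have hle := pv_foldl_min_le_mem (pvCands t1 ++ pvCands t2) 4 3 (hcomp 3 (by omega) h3)
          simp only [h0, h1, h2, h3, if_true]
          rcases hor with h | h
          · omega
          · obtain ⟨hb0, hb4, hbhit⟩ := hsound _ h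
            set b := (pvCands t1 ++ pvCands t2).foldl min 4 with hb
            have hcase : b = 0 ∨ b = 1 ∨ b = 2 ∨ b = 3 := by omega
            rcases hcase with hbe | hbe | hbe | hbe
            · exfalso; apply h0; simpa [hbe] using hbhit
            · exfalso; apply h1; simpa [hbe] using hbhit
            · exfalso; apply h2; simpa [hbe] using hbhit
            · exact hbe
        · simp only [h0, h1, h2, h3]
          rcases hor with h | h
          · exact h
          · exfalso
            obtain ⟨hb0, hb4, hbhit⟩ := hsound _ h
            set b := (pvCands t1 ++ pvCands t2).foldl min 4 with hb
            have hcase : b = 0 ∨ b = 1 ∨ b = 2 ∨ b = 3 := by omega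
            rcases hcase with hbe | hbe | hbe | hbe
            · apply h0; simpa [hbe] using hbhit
            · apply h1; simpa [hbe] using hbhit
            · apply h2; simpa [hbe] using hbhit
            · apply h3; simpa [hbe] using hbhit

set_option maxHeartbeats 1000000 in
theorem pv_main (t1 t2 : String) :
    pvALoop pvOrgTypes t1 t2 = pvPick (pvScanText (pvScanText (pvTypeNames.length : Int) t1) t2) := by
  rw [pv_names_len, pv_scan_eq, pv_scan_eq, ← List.foldl_append, pv_best_char, pv_aloop_char]
  by_cases h0 : pvHitJ t1 t2 0 <;> by_cases h1 : pvHitJ t1 t2 1 <;>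
  by_cases h2 : pvHitJ t1 t2 2 <;> by_cases h3 : pvHitJ t1 t2 3 <;>
    simp only [h0, h1, h2, h3, if_true, if_false, Bool.false_eq_true] <;> decide

-- ===== VERDICT (by name: the statement is the Claim_ definition above) =====
set_option maxHeartbeats 2000000 in
theorem determine_organization_type_spec : Claim_equal_determine_organization_type := by
  intro lead_data _
  unfold Spec_determine_organization_type determine_organization_type determine_organization_type_alt
  simp only [List.foldl_cons, List.foldl_nil]
  exact pv_main _ _
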